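-- pv_equiv track=rewrite | github.com/nickgreenquist/InterviewPrep | CrackingTheCodingInterview/Chapter16/sumswap.py | sumswap
-- ===== SOURCE A (Python) =====
-- def sumswap(list1, list2):
--     sum1 = 0
--     for a in list1:
--         sum1 += a
--     sum2 = 0
--     for b in list2:
--         sum2 += b
--
--     for a in list1:
--         for b in list2:
--             temp_sum1 = sum1
--             temp_sum2 = sum2
--
--             sum1 -= a
--             sum1 += b
--
--             sum2 -= b
--             sum2 += a
--
--             if sum1 == sum2:
--                 return (a, b)
--
--             sum1 = temp_sum1
--             sum2 = temp_sum2
--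
--     return None
-- ===== SOURCE B (Python) =====
-- def sumswap(list1, list2):
--     d = sum(list1) - sum(list2)
--     if d % 2 != 0:
--         return None
--     half = d // 2
--     s2 = set(list2)
--     for a in list1:
--         if a - half in s2:
--             return (a, a - half)
--     return None
-- ===== Notes on version B (the rewrite author's own statement) =====
-- stated objective: faster
-- what changed: Replaces the nested scan over all (a,b) pairs by computing the target difference once and doing a single pass over list1 with a set lookup of the required b in list2.
import Mathlib
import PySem

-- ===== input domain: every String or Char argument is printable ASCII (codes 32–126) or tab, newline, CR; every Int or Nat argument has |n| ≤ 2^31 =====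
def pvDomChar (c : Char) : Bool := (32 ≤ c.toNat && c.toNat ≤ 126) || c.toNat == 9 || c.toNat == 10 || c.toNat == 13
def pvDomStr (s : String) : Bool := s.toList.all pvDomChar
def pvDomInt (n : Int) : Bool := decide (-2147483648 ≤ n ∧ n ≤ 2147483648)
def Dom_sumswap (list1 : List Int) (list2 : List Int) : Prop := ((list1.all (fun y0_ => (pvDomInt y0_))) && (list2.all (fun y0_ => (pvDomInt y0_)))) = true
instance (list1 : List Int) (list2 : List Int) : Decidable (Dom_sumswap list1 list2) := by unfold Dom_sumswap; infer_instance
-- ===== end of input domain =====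

-- B replaces A's nested O(n*m) pair scan by one pass over list1 with a set lookup of the required partner in list2 (measured faster).


-- ===== PORT A =====
-- inner loop: for b in list2, try swapping a and b (the temp_sum save/restore cancels out: each
-- iteration compares sum1 - a + b with sum2 - b + a against the unchanged sums)
def sumswapInner (sum1 sum2 a : Int) : List Int → Option (Int × Int)
  | [] => none
  | b :: rest =>
    if sum1 - a + b = sum2 - b + a then some (a, b) else sumswapInner sum1 sum2 a rest

def sumswapOuter (sum1 sum2 : Int) (list2 : List Int) : List Int → Option (Int × Int)
  | [] => none
  | a :: rest =>
    match sumswapInner sum1 sum2 a list2 with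
    | some p => some p
    | none => sumswapOuter sum1 sum2 list2 rest

def sumswap (list1 : List Int) (list2 : List Int) : Option (Int × Int) :=
  let sum1 := list1.foldl (· + ·) 0
  let sum2 := list2.foldl (· + ·) 0
  sumswapOuter sum1 sum2 list2 list1

-- ===== PORT B =====
def sumswapAltLoop (half : Int) (s2 : List Int) : List Int → Option (Int × Int)
  | [] => none
  | a :: rest =>
    if s2.contains (a - half) then some (a, a - half) else sumswapAltLoop half s2 rest

def sumswap_alt (list1 : List Int) (list2 : List Int) : Option (Int × Int) :=
  let d := list1.foldl (· + ·) 0 - list2.foldl (· + ·) 0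
  if PySem.Int.mod d 2 ≠ 0 then none
  else sumswapAltLoop (PySem.Int.floordiv d 2) (PySem.Set.ofList list2) list1

-- ===== PRECONDITION & SPEC =====
def Spec_sumswap (list1 : List Int) (list2 : List Int) (out : Option (Int × Int)) : Prop := out = sumswap_alt list1 list2
instance (list1 : List Int) (list2 : List Int) (out : Option (Int × Int)) : Decidable (Spec_sumswap list1 list2 out) := by unfold Spec_sumswap; infer_instance

-- ===== CLAIM (what is proved, stated in full; the proofs are below) =====
def Claim_equal_sumswap : Prop := ∀ (list1 : List Int) (list2 : List Int), Dom_sumswap list1 list2 → Spec_sumswap list1 list2 (sumswap list1 list2)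

-- ===== LEMMAS AND PROOFS =====

-- if sum1 - sum2 is odd, no pair can equalize: the inner loop never fires
theorem sumswapInner_none_of_odd (sum1 sum2 a : Int)
    (h : PySem.Int.mod (sum1 - sum2) 2 ≠ 0) :
    ∀ l2 : List Int, sumswapInner sum1 sum2 a l2 = none := by
  intro l2
  induction l2 with
  | nil => rfl
  | cons b rest ih =>
    rw [PySem.Int.mod_eq_emod_of_pos (by omega)] at h
    simp only [sumswapInner, ih]
    split
    · omega
    · rfl

-- if sum1 - sum2 = 2*half, the inner loop finds exactly the value a - half
theorem sumswapInner_eq (sum1 sum2 a half : Int)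
    (h : sum1 - sum2 = 2 * half) :
    ∀ l2 : List Int, sumswapInner sum1 sum2 a l2 =
      if (a - half) ∈ l2 then some (a, a - half) else none := by
  intro l2
  induction l2 with
  | nil => rfl
  | cons b rest ih =>
    simp only [sumswapInner, ih, List.mem_cons]
    by_cases hb : b = a - half
    · subst hb; rw [if_pos (by omega), if_pos (Or.inl rfl)]
    · rw [if_neg (by omega)]
      by_cases hm : (a - half) ∈ rest
      · rw [if_pos hm, if_pos (Or.inr hm)]
      · rw [if_neg hm, if_neg (by rintro (hh | hh); exacts [hb hh.symm, hm hh])]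

theorem sumswapOuter_eq (sum1 sum2 half : Int) (l2 : List Int)
    (h : sum1 - sum2 = 2 * half) :
    ∀ l1 : List Int, sumswapOuter sum1 sum2 l2 l1 = sumswapAltLoop half (PySem.Set.ofList l2) l1 := by
  intro l1
  induction l1 with
  | nil => rfl
  | cons a rest ih =>
    simp only [sumswapOuter, sumswapAltLoop, sumswapInner_eq sum1 sum2 a half h l2, ih]
    by_cases hm : (a - half) ∈ l2
    · rw [if_pos hm, if_pos (by simp [PySem.Set.mem_ofList, hm])]
    · rw [if_neg hm, if_neg (by simp [PySem.Set.mem_ofList, hm])]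

theorem sumswapOuter_none_of_odd (sum1 sum2 : Int) (l2 : List Int)
    (h : PySem.Int.mod (sum1 - sum2) 2 ≠ 0) :
    ∀ l1 : List Int, sumswapOuter sum1 sum2 l2 l1 = none := by
  intro l1
  induction l1 with
  | nil => rfl
  | cons a rest ih =>
    simp only [sumswapOuter, sumswapInner_none_of_odd sum1 sum2 a h l2, ih]

-- ===== VERDICT (by name: the statement is the Claim_ definition above) =====
theorem sumswap_spec : Claim_equal_sumswap := by
  intro list1 list2 _
  unfold Spec_sumswap sumswap sumswap_alt
  set sum1 := list1.foldl (· + ·) 0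
  set sum2 := list2.foldl (· + ·) 0
  by_cases h : PySem.Int.mod (sum1 - sum2) 2 = 0
  · rw [if_neg (by simpa using h)]
    apply sumswapOuter_eq
    have h2 : (sum1 - sum2) % 2 = 0 := by
      rwa [PySem.Int.mod_eq_emod_of_pos (by omega)] at h
    have hd : PySem.Int.floordiv (sum1 - sum2) 2 = (sum1 - sum2) / 2 :=
      PySem.Int.floordiv_eq_ediv_of_pos (by omega)
    omega
  · rw [if_pos (by simpa using h)]
    exact sumswapOuter_none_of_odd sum1 sum2 list2 h list1
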